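-- pv_equiv track=rewrite | github.com/andre-sav/panopticon | src/data_processing.py | count_leads_by_status
-- ===== SOURCE A (Python) =====
-- def count_leads_by_status(leads: list[dict]) -> dict[str, int]:
--     """
--     Count leads by status category.
--
--     Args:
--         leads: List of formatted lead dictionaries (from format_leads_for_display)
--
--     Returns:
--         Dictionary with counts: {"stale": N, "at_risk": N, "needs_attention": N, "healthy": N}
--         Note: Leads with None or empty Status are counted as "healthy".
--         The sum of all counts always equals len(leads).
--     """
--     counts = {"stale": 0, "at_risk": 0, "needs_attention": 0, "healthy": 0}
--     for lead in leads:
--         status = lead.get("Status") or ""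
--         if "stale" in status:
--             counts["stale"] += 1
--         elif "at_risk" in status:
--             counts["at_risk"] += 1
--         elif "needs_attention" in status:
--             counts["needs_attention"] += 1
--         else:
--             counts["healthy"] += 1
--     return counts
-- ===== SOURCE B (Python) =====
-- def count_leads_by_status(leads: list[dict]) -> dict[str, int]:
--     def status(lead):
--         return lead.get("Status") or ""
--     stale = sum(1 for lead in leads if "stale" in status(lead))
--     at_risk = sum(1 for lead in leads
--                   if "at_risk" in status(lead) and "stale" not in status(lead))
--     needs_attention = sum(1 for lead in leads
--                           if "needs_attention" in status(lead)
--                           and "stale" not in status(lead)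
--                           and "at_risk" not in status(lead))
--     healthy = len(leads) - stale - at_risk - needs_attention
--     return {"stale": stale, "at_risk": at_risk,
--             "needs_attention": needs_attention, "healthy": healthy}
-- ===== Notes on version B (the rewrite author's own statement) =====
-- stated objective: alternative
-- what changed: Replaces the single loop with a stateful elif chain over a counts dict by three independent generator-sum passes (one per keyword, each excluding the higher-priority keywords) plus healthy computed as len(leads) minus the others.
import Mathlib
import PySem

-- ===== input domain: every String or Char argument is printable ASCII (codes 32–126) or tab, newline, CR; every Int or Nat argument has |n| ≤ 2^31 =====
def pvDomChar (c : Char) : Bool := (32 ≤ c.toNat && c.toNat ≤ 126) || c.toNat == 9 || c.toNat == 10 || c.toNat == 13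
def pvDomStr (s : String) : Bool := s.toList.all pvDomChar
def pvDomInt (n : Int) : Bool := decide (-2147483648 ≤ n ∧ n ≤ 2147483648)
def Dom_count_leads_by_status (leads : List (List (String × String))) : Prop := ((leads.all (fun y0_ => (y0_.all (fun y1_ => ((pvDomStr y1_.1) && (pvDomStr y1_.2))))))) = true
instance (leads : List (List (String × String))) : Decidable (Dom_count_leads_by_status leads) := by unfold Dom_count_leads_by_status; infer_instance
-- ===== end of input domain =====

-- B replaces A's single loop with an elif chain over a counts dict by three independent
-- counting passes (one per keyword, excluding higher-priority keywords) plus healthy as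
-- len(leads) minus the other three; same cost, different decomposition.

-- ===== PORT A =====
-- status = lead.get("Status") or ""   (Python `or`: a falsy value — None or "" — gives "")
def pvStatusA (lead : List (String × String)) : String :=
  match (PySem.Dict.ofList lead).get? "Status" with
  | some s => if s == "" then "" else s
  | none => ""

-- the loop body of A, named so the proofs can speak about one iteration
def pvStepA (counts : PySem.Dict String Int) (lead : List (String × String)) :
    PySem.Dict String Int :=
  let status := pvStatusA lead
  if PySem.Str.isIn "stale" status then
    counts.insert "stale" (counts.getD "stale" 0 + 1)
  else if PySem.Str.isIn "at_risk" status then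
    counts.insert "at_risk" (counts.getD "at_risk" 0 + 1)
  else if PySem.Str.isIn "needs_attention" status then
    counts.insert "needs_attention" (counts.getD "needs_attention" 0 + 1)
  else
    counts.insert "healthy" (counts.getD "healthy" 0 + 1)

def count_leads_by_status (leads : List (List (String × String))) : List (String × Int) :=
  let counts0 : PySem.Dict String Int :=
    PySem.Dict.ofList [("stale", 0), ("at_risk", 0), ("needs_attention", 0), ("healthy", 0)]
  (leads.foldl pvStepA counts0).items

-- ===== PORT B =====
-- status(lead) = lead.get("Status") or ""
def pvStatusB (lead : List (String × String)) : String :=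
  match (PySem.Dict.ofList lead).get? "Status" with
  | some s => if s == "" then "" else s
  | none => ""

def count_leads_by_status_alt (leads : List (List (String × String))) : List (String × Int) :=
  let stale : Int := leads.countP (fun l => PySem.Str.isIn "stale" (pvStatusB l))
  let at_risk : Int := leads.countP (fun l =>
    PySem.Str.isIn "at_risk" (pvStatusB l) && !PySem.Str.isIn "stale" (pvStatusB l))
  let needs_attention : Int := leads.countP (fun l =>
    PySem.Str.isIn "needs_attention" (pvStatusB l) && !PySem.Str.isIn "stale" (pvStatusB l)
      && !PySem.Str.isIn "at_risk" (pvStatusB l))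
  let healthy : Int := (leads.length : Int) - stale - at_risk - needs_attention
  [("stale", stale), ("at_risk", at_risk), ("needs_attention", needs_attention), ("healthy", healthy)]

-- ===== PRECONDITION & SPEC =====
def Spec_count_leads_by_status (leads : List (List (String × String))) (out : List (String × Int)) : Prop := out = count_leads_by_status_alt leads
instance (leads : List (List (String × String))) (out : List (String × Int)) : Decidable (Spec_count_leads_by_status leads out) := by unfold Spec_count_leads_by_status; infer_instance

-- ===== CLAIM (what is proved, stated in full; the proofs are below) =====
def Claim_equal_count_leads_by_status : Prop := ∀ (leads : List (List (String × String))), Dom_count_leads_by_status leads → Spec_count_leads_by_status leads (count_leads_by_status leads)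

-- ===== LEMMAS AND PROOFS =====

theorem pvStepA_stale {lead : List (String × String)} (s a n h : Int)
    (h1 : PySem.Str.isIn "stale" (pvStatusA lead) = true) :
    pvStepA (PySem.Dict.mk [("stale", s), ("at_risk", a), ("needs_attention", n), ("healthy", h)]) lead
      = PySem.Dict.mk [("stale", s + 1), ("at_risk", a), ("needs_attention", n), ("healthy", h)] := by
  simp only [pvStepA]; rw [if_pos h1]; rfl

theorem pvStepA_at_risk {lead : List (String × String)} (s a n h : Int)
    (h1 : ¬ PySem.Str.isIn "stale" (pvStatusA lead) = true)
    (h2 : PySem.Str.isIn "at_risk" (pvStatusA lead) = true) :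
    pvStepA (PySem.Dict.mk [("stale", s), ("at_risk", a), ("needs_attention", n), ("healthy", h)]) lead
      = PySem.Dict.mk [("stale", s), ("at_risk", a + 1), ("needs_attention", n), ("healthy", h)] := by
  simp only [pvStepA]; rw [if_neg h1, if_pos h2]; rfl

theorem pvStepA_needs {lead : List (String × String)} (s a n h : Int)
    (h1 : ¬ PySem.Str.isIn "stale" (pvStatusA lead) = true)
    (h2 : ¬ PySem.Str.isIn "at_risk" (pvStatusA lead) = true)
    (h3 : PySem.Str.isIn "needs_attention" (pvStatusA lead) = true) :
    pvStepA (PySem.Dict.mk [("stale", s), ("at_risk", a), ("needs_attention", n), ("healthy", h)]) lead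
      = PySem.Dict.mk [("stale", s), ("at_risk", a), ("needs_attention", n + 1), ("healthy", h)] := by
  simp only [pvStepA]; rw [if_neg h1, if_neg h2, if_pos h3]; rfl

theorem pvStepA_healthy {lead : List (String × String)} (s a n h : Int)
    (h1 : ¬ PySem.Str.isIn "stale" (pvStatusA lead) = true)
    (h2 : ¬ PySem.Str.isIn "at_risk" (pvStatusA lead) = true)
    (h3 : ¬ PySem.Str.isIn "needs_attention" (pvStatusA lead) = true) :
    pvStepA (PySem.Dict.mk [("stale", s), ("at_risk", a), ("needs_attention", n), ("healthy", h)]) lead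
      = PySem.Dict.mk [("stale", s), ("at_risk", a), ("needs_attention", n), ("healthy", h + 1)] := by
  simp only [pvStepA]; rw [if_neg h1, if_neg h2, if_neg h3]; rfl

theorem cls_loop (leads : List (List (String × String))) (s a n h : Int) :
    (leads.foldl pvStepA
      (PySem.Dict.mk [("stale", s), ("at_risk", a), ("needs_attention", n), ("healthy", h)])).items
    = [("stale", s + leads.countP (fun l => PySem.Str.isIn "stale" (pvStatusA l))),
       ("at_risk", a + leads.countP (fun l =>
          PySem.Str.isIn "at_risk" (pvStatusA l) && !PySem.Str.isIn "stale" (pvStatusA l))),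
       ("needs_attention", n + leads.countP (fun l =>
          PySem.Str.isIn "needs_attention" (pvStatusA l) && !PySem.Str.isIn "stale" (pvStatusA l)
            && !PySem.Str.isIn "at_risk" (pvStatusA l))),
       ("healthy", h + leads.countP (fun l =>
          !PySem.Str.isIn "stale" (pvStatusA l) && !PySem.Str.isIn "at_risk" (pvStatusA l)
            && !PySem.Str.isIn "needs_attention" (pvStatusA l)))] := by
  induction leads generalizing s a n h with
  | nil => simp
  | cons hd tl ih =>
    simp only [List.foldl_cons, List.countP_cons]
    by_cases h1 : PySem.Str.isIn "stale" (pvStatusA hd) = true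
    · rw [pvStepA_stale s a n h h1, ih]
      simp [PySem.Str.isIn_eq] at h1
      simp [h1]
      all_goals omega
    · by_cases h2 : PySem.Str.isIn "at_risk" (pvStatusA hd) = true
      · rw [pvStepA_at_risk s a n h h1 h2, ih]
        simp [PySem.Str.isIn_eq] at h1 h2
        simp [h1, h2]
        all_goals omega
      · by_cases h3 : PySem.Str.isIn "needs_attention" (pvStatusA hd) = true
        · rw [pvStepA_needs s a n h h1 h2 h3, ih]
          simp [PySem.Str.isIn_eq] at h1 h2 h3
          simp [h1, h2, h3]
          all_goals omega
        · rw [pvStepA_healthy s a n h h1 h2 h3, ih]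
          simp [PySem.Str.isIn_eq] at h1 h2 h3
          simp [h1, h2, h3]
          all_goals omega

theorem cls_partition (leads : List (List (String × String))) :
    leads.countP (fun l => PySem.Str.isIn "stale" (pvStatusA l))
      + leads.countP (fun l =>
          PySem.Str.isIn "at_risk" (pvStatusA l) && !PySem.Str.isIn "stale" (pvStatusA l))
      + leads.countP (fun l =>
          PySem.Str.isIn "needs_attention" (pvStatusA l) && !PySem.Str.isIn "stale" (pvStatusA l)
            && !PySem.Str.isIn "at_risk" (pvStatusA l))
      + leads.countP (fun l =>
          !PySem.Str.isIn "stale" (pvStatusA l) && !PySem.Str.isIn "at_risk" (pvStatusA l)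
            && !PySem.Str.isIn "needs_attention" (pvStatusA l))
      = leads.length := by
  induction leads with
  | nil => simp
  | cons hd tl ih =>
    simp only [List.countP_cons, List.length_cons]
    simp at ih
    by_cases h1 : PySem.Chars.isIn ['s','t','a','l','e'] (pvStatusA hd).toList = true <;>
      by_cases h2 : PySem.Chars.isIn ['a','t','_','r','i','s','k'] (pvStatusA hd).toList = true <;>
        by_cases h3 : PySem.Chars.isIn ['n','e','e','d','s','_','a','t','t','e','n','t','i','o','n'] (pvStatusA hd).toList = true <;>
          simp [h1, h2, h3] <;> omega

theorem count_leads_by_status_spec : Claim_equal_count_leads_by_status := by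
  intro leads _
  unfold Spec_count_leads_by_status count_leads_by_status count_leads_by_status_alt
  have hBA : pvStatusB = pvStatusA := rfl
  rw [hBA]
  rw [show (PySem.Dict.ofList [("stale", (0:Int)), ("at_risk", 0), ("needs_attention", 0), ("healthy", 0)])
        = PySem.Dict.mk [("stale", 0), ("at_risk", 0), ("needs_attention", 0), ("healthy", 0)] from rfl]
  rw [cls_loop]
  have hp := cls_partition leads
  simp only [zero_add, List.cons.injEq, Prod.mk.injEq, and_true, true_and]
  omega
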